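-- pv_equiv track=rewrite | github.com/erdemeraslan/text_to_csv | text_to_csv_parser.py | parse_slice
-- ===== SOURCE A (Python) =====
-- def parse_slice(headers, data):
--     record_size = len(headers)
--     record_num = len(data) // record_size
--
--     records = []
--     start = 0
--     for i in range(record_num):
--         end = start + record_size
--
--         records.append(
--             {h: f for h, f in zip(headers, data[start:end])})
--
--         start = start + record_size
--
--     return records
-- ===== SOURCE B (Python) =====
-- def parse_slice(headers, data):
--     # Grouper idiom: one shared iterator consumed in lockstep; the remainder
--     # (and the empty-headers case) naturally yields no chunk.
--     return [dict(zip(headers, chunk))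
--             for chunk in zip(*[iter(data)] * len(headers))]
-- ===== Notes on version B (the rewrite author's own statement) =====
-- stated objective: idiomatic
-- what changed: Replaces the manual start/end index bookkeeping and repeated slicing with the standard grouper idiom zip(*[iter(data)]*n) over one shared iterator, a single comprehension instead of a counter loop.
import Mathlib
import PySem

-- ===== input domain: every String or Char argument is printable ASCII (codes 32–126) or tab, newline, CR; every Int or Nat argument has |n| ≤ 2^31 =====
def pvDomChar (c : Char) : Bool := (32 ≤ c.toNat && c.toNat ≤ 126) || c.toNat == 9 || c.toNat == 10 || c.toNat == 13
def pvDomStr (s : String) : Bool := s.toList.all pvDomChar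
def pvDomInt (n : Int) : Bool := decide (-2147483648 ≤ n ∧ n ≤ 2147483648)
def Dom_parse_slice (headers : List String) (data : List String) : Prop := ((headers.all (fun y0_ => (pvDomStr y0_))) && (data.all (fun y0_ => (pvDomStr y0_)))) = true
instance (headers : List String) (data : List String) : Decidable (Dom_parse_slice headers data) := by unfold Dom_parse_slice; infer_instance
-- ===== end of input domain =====

-- B replaces A's manual start/end index bookkeeping and repeated slicing with the
-- grouper idiom (one shared iterator consumed in lockstep chunks); same cost, more idiomatic.


-- ===== PORT A =====
-- {h: f for h, f in zip(headers, fields)} — dict comprehension: insert each pair in order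
def pvDictOfZip (headers fields : List String) : List (String × String) :=
  ((headers.zip fields).foldl (fun d p => PySem.Dict.insert d p.1 p.2)
    (PySem.Dict.empty : PySem.Dict String String)).items

def parse_slice (headers : List String) (data : List String) : List (List (String × String)) :=
  let record_size : Int := headers.length
  let record_num : Int := PySem.Int.floordiv (data.length : Int) record_size
  let st := (PySem.List.pyRange 0 record_num 1).foldl
    (fun (st : List (List (String × String)) × Int) _i =>
      let start := st.2
      let e := start + record_size
      (st.1 ++ [pvDictOfZip headers (PySem.List.slice data (some start) (some e))],
       start + record_size))
    ([], 0)
  st.1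

-- ===== PORT B =====
-- zip(*[iter(data)]*n): consume the shared iterator n items at a time while a full
-- chunk remains (fuel = remaining length bounds the consumption; exact).
def pvChunksGo (n : Nat) (fuel : Nat) (xs : List String) : List (List String) :=
  match fuel with
  | 0 => []
  | fuel + 1 =>
    if 0 < n ∧ n ≤ xs.length then xs.take n :: pvChunksGo n fuel (xs.drop n) else []

def parse_slice_alt (headers : List String) (data : List String) : List (List (String × String)) :=
  (pvChunksGo headers.length data.length data).map (fun chunk => pvDictOfZip headers chunk)

-- ===== PRECONDITION & SPEC =====
-- Pre_ excludes empty headers, where A raises ZeroDivisionError (len(data) // 0).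
def Pre_parse_slice (headers : List String) (data : List String) : Prop := headers ≠ []
instance (headers : List String) (data : List String) : Decidable (Pre_parse_slice headers data) := by unfold Pre_parse_slice; infer_instance
def pvWitness_parse_slice : List String × List String := (["a", "b"], ["1", "2", "3", "4", "5"])

def Spec_parse_slice (headers : List String) (data : List String) (out : List (List (String × String))) : Prop := out = parse_slice_alt headers data
instance (headers : List String) (data : List String) (out : List (List (String × String))) : Decidable (Spec_parse_slice headers data out) := by unfold Spec_parse_slice; infer_instance

-- ===== CLAIM (what is proved, stated in full; the proofs are below) =====
def Claim_equal_parse_slice : Prop := ∀ (headers : List String) (data : List String), Dom_parse_slice headers data → Pre_parse_slice headers data → Spec_parse_slice headers data (parse_slice headers data)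

-- ===== LEMMAS AND PROOFS =====

-- A's loop: after k iterations the accumulator holds the first k chunks and start = k*n.
lemma pvA_loop (data : List String) (headers : List String) (k : Nat) :
    (PySem.List.pyRange 0 (k : Int) 1).foldl
      (fun (st : List (List (String × String)) × Int) _i =>
        (st.1 ++ [pvDictOfZip headers (PySem.List.slice data (some st.2) (some (st.2 + (headers.length : Int))))],
         st.2 + (headers.length : Int)))
      ([], 0)
    = ((List.range k).map (fun i => pvDictOfZip headers ((data.drop (i * headers.length)).take headers.length)),
       ((k * headers.length : Nat) : Int)) := by
  induction k with
  | zero => simp [PySem.List.pyRange_one_eq_nil]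
  | succ k ih =>
    have hcast : ((k + 1 : Nat) : Int) = (k : Int) + 1 := by push_cast; ring
    rw [hcast, PySem.List.pyRange_one_succ_right (by positivity), List.foldl_append, ih]
    simp only [List.foldl_cons, List.foldl_nil]
    rw [PySem.List.slice_natCast_add]
    rw [Prod.mk.injEq]
    exact ⟨by simp [List.range_succ], by push_cast; ring⟩

-- B's grouper: with enough fuel it yields exactly the ⌊len/n⌋ full chunks.
lemma pvB_chunks (n : Nat) (hn : 0 < n) :
    ∀ (fuel : Nat) (xs : List String), xs.length ≤ fuel →
      pvChunksGo n fuel xs = (List.range (xs.length / n)).map (fun i => (xs.drop (i * n)).take n) := by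
  intro fuel
  induction fuel with
  | zero =>
    intro xs hle
    have : xs.length = 0 := Nat.le_zero.mp hle
    simp [pvChunksGo, this, Nat.zero_div]
  | succ fuel ih =>
    intro xs hle
    by_cases h : n ≤ xs.length
    · have hlt : (xs.drop n).length ≤ fuel := by simp [List.length_drop]; omega
      have hdiv : xs.length / n = (xs.length - n) / n + 1 := by
        rw [Nat.div_eq]; simp [hn, h]
      simp only [pvChunksGo, ih _ hlt, List.length_drop, hdiv,
        List.range_succ_eq_map, List.map_cons, List.map_map]
      rw [if_pos ⟨hn, h⟩]
      refine List.cons_eq_cons.mpr ⟨by simp, ?_⟩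
      apply List.map_congr_left
      intro i _
      simp [List.drop_drop, Function.comp, Nat.succ_mul, Nat.add_comm]
    · have : xs.length / n = 0 := Nat.div_eq_of_lt (by omega)
      simp [pvChunksGo, h, this]

-- ===== VERDICT (by name: the statement is the Claim_ definition above) =====
theorem parse_slice_spec : Claim_equal_parse_slice := by
  intro headers data _ hpre
  unfold Spec_parse_slice parse_slice parse_slice_alt
  have hn : 0 < headers.length := List.length_pos_iff.mpr hpre
  simp only []
  rw [show PySem.Int.floordiv (data.length : Int) (headers.length : Int)
        = ((data.length / headers.length : Nat) : Int) from PySem.Int.floordiv_natCast _ _]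
  rw [pvA_loop data headers (data.length / headers.length)]
  rw [pvB_chunks headers.length hn data.length data (le_refl _)]
  simp [List.map_map, Function.comp]
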